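-- pv_equiv track=rewrite | github.com/TimurSungatullin/Information_Security | 1 семестровая работа/serpent.py | get_sub_keys
-- ===== SOURCE A (Python) =====
-- from functools import reduce
--
-- TOTAL = 128
--
-- G = '9e3779b9'
--
-- def cyclic_shift(byte, value):
--     bit = bin(int(byte, 16)).split('b')[-1].rjust(32, '0')
--     byte = hex(int('0b' + bit[value:] + bit[:value], 2)).split('x')[-1]
--     return byte.rjust(8, '0')
--
-- def xor_func(el_prev, el):
--     return hex(int(el_prev, 16) ^ int(el, 16)).split('x')[-1]
--
-- def zip_add(*arr):
--     max_len = 0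
--     for i in arr:
--         if max_len < len(i):
--             max_len = len(i)
--     new_arr = []
--     for i in arr:
--         new_arr.append((max_len - len(i)) * '0' + i)
--     return zip(*new_arr)
--
-- def byte_xor(*arr_bytes):
--     q = ''.join([reduce(xor_func, byte) for byte in zip_add(*arr_bytes)])
--     return q
--
-- S_table = [
--     [3, 8, 15, 1, 10, 6, 5, 11, 14, 13, 4, 2, 7, 0, 9, 12],  # S0
--     [15, 12, 2, 7, 9, 0, 5, 10, 1, 11, 14, 8, 6, 13, 3, 4],  # S1
--     [8, 6, 7, 9, 3, 12, 10, 15, 13, 1, 14, 4, 0, 11, 5, 2],  # S2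
--     [0, 15, 11, 8, 12, 9, 6, 3, 13, 1, 2, 4, 10, 7, 5, 14],  # S3
--     [1, 15, 8, 3, 12, 0, 11, 6, 2, 5, 4, 10, 9, 14, 7, 13],  # S4
--     [15, 5, 2, 11, 4, 10, 9, 12, 0, 3, 14, 8, 13, 6, 7, 1],  # S5
--     [7, 2, 12, 5, 8, 4, 6, 11, 14, 9, 1, 15, 13, 3, 10, 0],  # S6
--     [1, 13, 15, 0, 14, 8, 2, 11, 7, 4, 12, 10, 9, 3, 5, 6],  # S7
-- ]
--
-- def ip(arr=None, bits=None):
--     if arr: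
--         x = bin(int(''.join(arr), 16)).split('b')[-1].rjust(TOTAL, '0')
--     if bits:
--         x = bits
--     c = [0] * TOTAL
--     t = ''
--     for index in range(TOTAL):
--         # j = index // 4
--         # new_index = (index % 4) * 32 + j
--         # c[new_index] = x[index]
--         t += x[IPTable[index]]
--     new_value = int('0b' + t, 2)
--     return hex(new_value).split('x')[-1]
--
-- def get_s_table_val(index, args, s_table=S_table):
--     row_s_table = s_table[index]
--     arr = []
--     for arg in args:
--         s = ''
--         for i in arg:
--             s += hex(row_s_table[int(i, 16)]).split('x')[-1]
--         arr.append(s)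
--     return ''.join(arr)
--
-- def word4(i):
--     return '0' * 6 + hex(i).split('x')[-1]
--
-- IPTable = [
--     0, 32, 64, 96, 1, 33, 65, 97, 2, 34, 66, 98, 3, 35, 67, 99,
--     4, 36, 68, 100, 5, 37, 69, 101, 6, 38, 70, 102, 7, 39, 71, 103,
--     8, 40, 72, 104, 9, 41, 73, 105, 10, 42, 74, 106, 11, 43, 75, 107,
--     12, 44, 76, 108, 13, 45, 77, 109, 14, 46, 78, 110, 15, 47, 79, 111,
--     16, 48, 80, 112, 17, 49, 81, 113, 18, 50, 82, 114, 19, 51, 83, 115,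
--     20, 52, 84, 116, 21, 53, 85, 117, 22, 54, 86, 118, 23, 55, 87, 119,
--     24, 56, 88, 120, 25, 57, 89, 121, 26, 58, 90, 122, 27, 59, 91, 123,
--     28, 60, 92, 124, 29, 61, 93, 125, 30, 62, 94, 126, 31, 63, 95, 127,
-- ]
--
-- def get_sub_keys(key):
--     w = [0] * 12
--     k = []
--     for i in range(8):
--         w[i] = key[i * 8: (i + 1) * 8]
--
--     for i in range(33):
--         for j in range(4):
--             w[j + 8] = cyclic_shift(
--                 byte_xor(w[j], w[j + 3], w[j + 5],
--                          w[j + 7], G, word4(4 * i + j)),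
--                 11)
--         k.append(ip(get_s_table_val((11 - i) % 8, w[8:12])).rjust(8, '0'))
--         w[0:8] = w[4:12]
--     return k
-- ===== SOURCE B (Python) =====
-- # Integer-based Serpent prekey schedule: native 32-bit arithmetic instead of hex-string juggling.
-- IPTable = [
--     0, 32, 64, 96, 1, 33, 65, 97, 2, 34, 66, 98, 3, 35, 67, 99,
--     4, 36, 68, 100, 5, 37, 69, 101, 6, 38, 70, 102, 7, 39, 71, 103,
--     8, 40, 72, 104, 9, 41, 73, 105, 10, 42, 74, 106, 11, 43, 75, 107,
--     12, 44, 76, 108, 13, 45, 77, 109, 14, 46, 78, 110, 15, 47, 79, 111,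
--     16, 48, 80, 112, 17, 49, 81, 113, 18, 50, 82, 114, 19, 51, 83, 115,
--     20, 52, 84, 116, 21, 53, 85, 117, 22, 54, 86, 118, 23, 55, 87, 119,
--     24, 56, 88, 120, 25, 57, 89, 121, 26, 58, 90, 122, 27, 59, 91, 123,
--     28, 60, 92, 124, 29, 61, 93, 125, 30, 62, 94, 126, 31, 63, 95, 127,
-- ]
--
-- S_table = [
--     [3, 8, 15, 1, 10, 6, 5, 11, 14, 13, 4, 2, 7, 0, 9, 12],
--     [15, 12, 2, 7, 9, 0, 5, 10, 1, 11, 14, 8, 6, 13, 3, 4],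
--     [8, 6, 7, 9, 3, 12, 10, 15, 13, 1, 14, 4, 0, 11, 5, 2],
--     [0, 15, 11, 8, 12, 9, 6, 3, 13, 1, 2, 4, 10, 7, 5, 14],
--     [1, 15, 8, 3, 12, 0, 11, 6, 2, 5, 4, 10, 9, 14, 7, 13],
--     [15, 5, 2, 11, 4, 10, 9, 12, 0, 3, 14, 8, 13, 6, 7, 1],
--     [7, 2, 12, 5, 8, 4, 6, 11, 14, 9, 1, 15, 13, 3, 10, 0],
--     [1, 13, 15, 0, 14, 8, 2, 11, 7, 4, 12, 10, 9, 3, 5, 6],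
-- ]
--
-- PHI = 0x9E3779B9
-- MASK32 = 0xFFFFFFFF
--
--
-- def _rotl11(v):
--     return ((v << 11) & MASK32) | (v >> 21)
--
--
-- def _sbox_word(row, v):
--     out = 0
--     for j in range(8):
--         out = (out << 4) | row[(v >> (28 - 4 * j)) & 0xF]
--     return out
--
--
-- def _permute(x):
--     k = 0
--     for pos in IPTable:
--         k = (k << 1) | ((x >> (127 - pos)) & 1)
--     return k
--
--
-- def get_sub_keys(key):
--     w = [0] * 12
--     for i in range(8):
--         chunk = key[i * 8:(i + 1) * 8]
--         w[i] = int(chunk, 16) if chunk else 0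
--     keys = []
--     for i in range(33):
--         for j in range(4):
--             w[j + 8] = _rotl11(w[j] ^ w[j + 3] ^ w[j + 5] ^ w[j + 7]
--                                ^ PHI ^ (4 * i + j))
--         row = S_table[(11 - i) % 8]
--         x = 0
--         for j in range(4):
--             x = (x << 32) | _sbox_word(row, w[8 + j])
--         keys.append(format(_permute(x), 'x').rjust(8, '0'))
--         w[:8] = w[4:]
--     return keys
-- ===== Notes on version B (the rewrite author's own statement) =====
-- stated objective: alternative
-- what changed: The schedule is recomputed on native 32-bit integers (xor/rotate/S-box/bit-permutation as integer arithmetic, one hex-format at the end) instead of round-tripping every word through hex and binary character strings.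
import Mathlib
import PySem

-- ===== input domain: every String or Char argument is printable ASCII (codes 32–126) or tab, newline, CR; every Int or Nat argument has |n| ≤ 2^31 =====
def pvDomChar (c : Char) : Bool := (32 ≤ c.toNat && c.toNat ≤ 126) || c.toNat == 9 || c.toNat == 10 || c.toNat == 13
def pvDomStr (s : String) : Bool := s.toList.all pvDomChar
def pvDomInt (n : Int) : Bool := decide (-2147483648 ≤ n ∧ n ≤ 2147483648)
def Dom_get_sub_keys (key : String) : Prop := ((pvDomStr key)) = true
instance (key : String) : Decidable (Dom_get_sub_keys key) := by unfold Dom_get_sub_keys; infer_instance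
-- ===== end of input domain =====

-- B recomputes the Serpent prekey schedule on native 32-bit integers instead of hex/binary
-- character strings (a genuinely different data representation; intended to be cheaper per round).

-- c.isdigit()-style test for hex digits (exactly the single chars int(·,16) accepts)
def isHexC (c : Char) : Bool :=
  (48 ≤ c.toNat && c.toNat ≤ 57) || (97 ≤ c.toNat && c.toNat ≤ 102) || (65 ≤ c.toNat && c.toNat ≤ 70)

-- shared low-level helpers (hex digit value / digit character / Python's hex()/bin() digit list)
-- int(c, 16) for a single hex-digit character (exact on hex digits; Pre_ restricts to those)
def hexVal (c : Char) : Nat :=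
  if c.toNat ≤ 57 then c.toNat - 48 else if c.toNat ≤ 70 then c.toNat - 55 else c.toNat - 87

-- the character hex(n)[2:] uses for one digit n < 16
def digChar (n : Nat) : Char := if n < 10 then Char.ofNat (48 + n) else Char.ofNat (87 + n)

-- int(s, b) for a string of digit chars of base b (exact when all chars are digits of base b)
def parseB (b : Nat) (s : List Char) : Nat := s.foldl (fun a c => a * b + hexVal c) 0

-- hex(v)[2:] (b = 16) / bin(v)[2:] (b = 2): most-significant digit first, '0' for 0
def pyDigits (b : Nat) (v : Nat) : List Char :=
  if h : v < b ∨ b ≤ 1 then [digChar v]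
  else pyDigits b (v / b) ++ [digChar (v % b)]
  decreasing_by
    have hb : 2 ≤ b := by omega
    exact Nat.div_lt_self (by omega) (by omega)

-- s.rjust(k, '0')
def rjustZ (k : Nat) (s : List Char) : List Char := List.replicate (k - s.length) '0' ++ s

def S_table : List (List Nat) :=
  [[3, 8, 15, 1, 10, 6, 5, 11, 14, 13, 4, 2, 7, 0, 9, 12],
   [15, 12, 2, 7, 9, 0, 5, 10, 1, 11, 14, 8, 6, 13, 3, 4],
   [8, 6, 7, 9, 3, 12, 10, 15, 13, 1, 14, 4, 0, 11, 5, 2],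
   [0, 15, 11, 8, 12, 9, 6, 3, 13, 1, 2, 4, 10, 7, 5, 14],
   [1, 15, 8, 3, 12, 0, 11, 6, 2, 5, 4, 10, 9, 14, 7, 13],
   [15, 5, 2, 11, 4, 10, 9, 12, 0, 3, 14, 8, 13, 6, 7, 1],
   [7, 2, 12, 5, 8, 4, 6, 11, 14, 9, 1, 15, 13, 3, 10, 0],
   [1, 13, 15, 0, 14, 8, 2, 11, 7, 4, 12, 10, 9, 3, 5, 6]]

def IPTable : List Nat :=
  [0, 32, 64, 96, 1, 33, 65, 97, 2, 34, 66, 98, 3, 35, 67, 99,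
   4, 36, 68, 100, 5, 37, 69, 101, 6, 38, 70, 102, 7, 39, 71, 103,
   8, 40, 72, 104, 9, 41, 73, 105, 10, 42, 74, 106, 11, 43, 75, 107,
   12, 44, 76, 108, 13, 45, 77, 109, 14, 46, 78, 110, 15, 47, 79, 111,
   16, 48, 80, 112, 17, 49, 81, 113, 18, 50, 82, 114, 19, 51, 83, 115,
   20, 52, 84, 116, 21, 53, 85, 117, 22, 54, 86, 118, 23, 55, 87, 119,
   24, 56, 88, 120, 25, 57, 89, 121, 26, 58, 90, 122, 27, 59, 91, 123,
   28, 60, 92, 124, 29, 61, 93, 125, 30, 62, 94, 126, 31, 63, 95, 127]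

-- ===== PORT A =====
def Gstr : List Char := ['9', 'e', '3', '7', '7', '9', 'b', '9']   -- G = '9e3779b9'

-- hex(int(el_prev,16) ^ int(el,16)).split('x')[-1]
def xor_func (el_prev el : List Char) : List Char :=
  pyDigits 16 ((parseB 16 el_prev) ^^^ (parseB 16 el))

-- zip(*arrs) (stops at the shortest list)
def zipStar (ls : List (List Char)) : List (List Char) :=
  if h : ls.isEmpty ∨ ls.any List.isEmpty then [] else
    ls.map (fun s => s.headD '0') :: zipStar (ls.map List.tail)
  termination_by (ls.headD []).length
  decreasing_by
    simp only [not_or, List.isEmpty_iff, List.any_eq_true, not_exists, not_and] at h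
    obtain ⟨h1, h2⟩ := h
    match ls, h1 with
    | s :: ls', _ =>
      have hs : ¬ s = [] := h2 s (by simp)
      simp only [List.map_cons, List.headD_cons]
      cases s with
      | nil => exact absurd rfl hs
      | cons c cs => simp

def zip_add (args : List (List Char)) : List (List Char) :=
  let maxLen := args.foldl (fun m s => if m < s.length then s.length else m) 0
  zipStar (args.map (fun s => List.replicate (maxLen - s.length) '0' ++ s))

-- functools.reduce(xor_func, col); Python raises on an empty tuple (unreachable at the call site)
def reduceXor (col : List Char) : List Char :=
  match col with
  | [] => []
  | c :: rest => rest.foldl (fun acc d => xor_func acc [d]) [c]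

def byte_xor (args : List (List Char)) : List Char :=
  ((zip_add args).map reduceXor).flatten

def cyclic_shift (byte : List Char) (value : Nat) : List Char :=
  let bit := rjustZ 32 (pyDigits 2 (parseB 16 byte))
  rjustZ 8 (pyDigits 16 (parseB 2 (List.drop value bit ++ List.take value bit)))

-- ip is only ever called with arr=<4 words>, bits=None: the dead 'bits' branch is dropped
-- ip's argument at the call site is the 32-char STRING from get_s_table_val; ''.join over a
-- str is the identity, so arr is a List Char here
def ip (arr : List Char) : List Char :=
  let x := rjustZ 128 (pyDigits 2 (parseB 16 arr))
  let t := (List.range 128).foldl (fun t idx => t ++ [x.getD (IPTable.getD idx 0) '0']) ([] : List Char)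
  pyDigits 16 (parseB 2 t)

def get_s_table_val (index : Nat) (args : List (List Char)) : List Char :=
  let row := S_table.getD index []
  (args.map (fun arg => arg.foldl (fun s c => s ++ pyDigits 16 (row.getD (hexVal c) 0)) ([] : List Char))).flatten

def word4 (i : Nat) : List Char := List.replicate 6 '0' ++ pyDigits 16 i

def stepA (i : Nat) (w : List (List Char)) (j : Nat) : List (List Char) :=
  w.set (j + 8) (cyclic_shift (byte_xor
    [w.getD j [], w.getD (j + 3) [], w.getD (j + 5) [], w.getD (j + 7) [],
     Gstr, word4 (4 * i + j)]) 11)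

def roundA (st : List (List Char) × List (List Char)) (i : Nat) :
    List (List Char) × List (List Char) :=
  let w := (List.range 4).foldl (stepA i) st.1
  let k := st.2 ++ [rjustZ 8 (ip (get_s_table_val ((PySem.Int.mod (11 - (i : Int)) 8).toNat)
    (PySem.List.slice w (some ((8 : Nat) : Int)) (some ((12 : Nat) : Int)))))]
  (PySem.List.slice w (some ((4 : Nat) : Int)) (some ((12 : Nat) : Int)) ++
     PySem.List.slice w (some ((8 : Nat) : Int)) (some ((12 : Nat) : Int)), k)

def get_sub_keys (key : String) : List String :=
  let ks := key.toList
  let w0 := (List.range 8).foldl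
    (fun w i => w.set i (PySem.List.slice ks (some ((i * 8 : Nat) : Int)) (some (((i + 1) * 8 : Nat) : Int))))
    (List.replicate 12 ([] : List Char))
  (((List.range 33).foldl roundA (w0, [])).2).map (fun s => String.ofList s)

-- ===== PORT B =====
def rotl11 (v : Nat) : Nat := ((v <<< 11) &&& 0xFFFFFFFF) ||| (v >>> 21)

def sboxWord (row : List Nat) (v : Nat) : Nat :=
  (List.range 8).foldl (fun out j => (out <<< 4) ||| row.getD ((v >>> (28 - 4 * j)) &&& 0xF) 0) 0

def permuteIP (x : Nat) : Nat :=
  IPTable.foldl (fun k pos => (k <<< 1) ||| ((x >>> (127 - pos)) &&& 1)) 0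

def stepB (i : Nat) (w : List Nat) (j : Nat) : List Nat :=
  w.set (j + 8) (rotl11
    (((((w.getD j 0 ^^^ w.getD (j + 3) 0) ^^^ w.getD (j + 5) 0) ^^^ w.getD (j + 7) 0)
      ^^^ 0x9E3779B9) ^^^ (4 * i + j)))

def roundB (st : List Nat × List (List Char)) (i : Nat) : List Nat × List (List Char) :=
  let w := (List.range 4).foldl (stepB i) st.1
  let row := S_table.getD ((PySem.Int.mod (11 - (i : Int)) 8).toNat) []
  let x := (List.range 4).foldl (fun x j => (x <<< 32) ||| sboxWord row (w.getD (8 + j) 0)) 0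
  (List.drop 4 w ++ List.drop 8 w, st.2 ++ [rjustZ 8 (pyDigits 16 (permuteIP x))])

def get_sub_keys_alt (key : String) : List String :=
  let ks := key.toList
  let w0 := (List.range 8).foldl
    (fun w i =>
      let chunk := PySem.List.slice ks (some ((i * 8 : Nat) : Int)) (some (((i + 1) * 8 : Nat) : Int))
      w.set i (if chunk = [] then 0 else parseB 16 chunk))
    (List.replicate 12 (0 : Nat))
  (((List.range 33).foldl roundB (w0, [])).2).map (fun s => String.ofList s)

-- ===== PRECONDITION & SPEC =====
-- Pre_: int(·, 16) accepts exactly hex digits; A raises ValueError iff a used key character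
-- (one of the first 64) is not a hex digit.
def Pre_get_sub_keys (key : String) : Prop :=
  ∀ p ∈ key.toList.zipIdx, p.2 < 64 → isHexC p.1 = true
instance (key : String) : Decidable (Pre_get_sub_keys key) := by unfold Pre_get_sub_keys; infer_instance

def pvWitness_get_sub_keys : String := "ab"

def Spec_get_sub_keys (key : String) (out : List String) : Prop := out = get_sub_keys_alt key
instance (key : String) (out : List String) : Decidable (Spec_get_sub_keys key out) := by unfold Spec_get_sub_keys; infer_instance

-- ===== CLAIM (what is proved, stated in full; the proofs are below) =====
def Claim_equal_get_sub_keys : Prop := ∀ (key : String), Dom_get_sub_keys key → Pre_get_sub_keys key → Spec_get_sub_keys key (get_sub_keys key)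

-- ===== LEMMAS AND PROOFS =====

-- proof-only notions: canonical fixed-width digit strings and the word relation
def fixedD (b k v : Nat) : List Char :=
  (List.range k).map (fun j => digChar (v / b ^ (k - 1 - j) % b))

def Hex8 (s : List Char) : Prop := s.length ≤ 8 ∧ ∀ c ∈ s, isHexC c = true

def WRel (wA : List (List Char)) (wB : List Nat) : Prop :=
  wA.length = 12 ∧ wB.length = 12 ∧
  ∀ j : Nat, Hex8 (wA.getD j []) ∧ parseB 16 (wA.getD j []) = wB.getD j 0

theorem hexVal_digChar : ∀ n < 16, hexVal (digChar n) = n := by decide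

theorem fixedD_length (b k v : Nat) : (fixedD b k v).length = k := by
  simp [fixedD]

theorem isHexC_digChar : ∀ n < 16, isHexC (digChar n) = true := by decide

theorem hexVal_lt_of_isHexDigit (c : Char) (h : isHexC c = true) : hexVal c < 16 := by
  simp [isHexC] at h
  unfold hexVal
  split_ifs <;> omega

theorem parseB_from (b : Nat) (s : List Char) (a : Nat) :
    s.foldl (fun a c => a * b + hexVal c) a = a * b ^ s.length + parseB b s := by
  induction s generalizing a with
  | nil => simp [parseB]
  | cons c t ih =>
    simp only [List.foldl_cons, List.length_cons]
    rw [ih (a * b + hexVal c)]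
    have h2 : parseB b (c :: t) = t.foldl (fun a c => a * b + hexVal c) (0 * b + hexVal c) := rfl
    rw [h2, ih (0 * b + hexVal c)]
    ring

theorem parseB_append (b : Nat) (s t : List Char) :
    parseB b (s ++ t) = parseB b s * b ^ t.length + parseB b t := by
  have : parseB b (s ++ t) = t.foldl (fun a c => a * b + hexVal c) (parseB b s) := by
    simp [parseB, List.foldl_append]
  rw [this, parseB_from]

theorem parseB_replicate_zero (b m : Nat) (s : List Char) :
    parseB b (List.replicate m '0' ++ s) = parseB b s := by
  rw [parseB_append]
  have : parseB b (List.replicate m '0') = 0 := by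
    induction m with
    | zero => rfl
    | succ n ih =>
      have : List.replicate (n + 1) '0' = '0' :: List.replicate n '0' := rfl
      rw [this]
      have h2 : parseB b ('0' :: List.replicate n '0')
          = (List.replicate n '0').foldl (fun a c => a * b + hexVal c) (0 * b + hexVal '0') := rfl
      rw [h2, parseB_from]
      simpa [hexVal] using ih
  simp [this]

theorem parseB_lt (b : Nat) (hb : 1 ≤ b) (s : List Char) (h : ∀ c ∈ s, hexVal c < b) :
    parseB b s < b ^ s.length := by
  induction s with
  | nil => simp [parseB]
  | cons c t ih =>
    have h2 : parseB b (c :: t) = t.foldl (fun a c => a * b + hexVal c) (0 * b + hexVal c) := rfl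
    rw [h2, parseB_from]
    have hc : hexVal c < b := h c (by simp)
    have ht : parseB b t < b ^ t.length := ih (fun c hc => h c (by simp [hc]))
    have hmul : (hexVal c + 1) * b ^ t.length ≤ b * b ^ t.length :=
      Nat.mul_le_mul_right _ (by omega)
    calc (0 * b + hexVal c) * b ^ t.length + parseB b t
        = hexVal c * b ^ t.length + parseB b t := by ring
      _ < hexVal c * b ^ t.length + b ^ t.length := by omega
      _ = (hexVal c + 1) * b ^ t.length := by ring
      _ ≤ b * b ^ t.length := hmul
      _ = b ^ (c :: t).length := by simp [List.length_cons, pow_succ']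

theorem pyDigits_length_le (b v k : Nat) (hb : 2 ≤ b) (hk : 1 ≤ k) (hv : v < b ^ k) :
    (pyDigits b v).length ≤ k := by
  induction v using Nat.strong_induction_on generalizing k with
  | _ v ih =>
    rw [pyDigits]
    split
    · simpa using hk
    · rename_i h
      simp only [not_or, not_lt, not_le] at h
      obtain ⟨h1, h2⟩ := h
      have hk2 : 2 ≤ k := by
        by_contra hlt
        have hk1 : k = 1 := by omega
        subst hk1
        simp only [pow_one] at hv
        omega
      have hdiv : v / b < b ^ (k - 1) := by
        rw [Nat.div_lt_iff_lt_mul (by omega)]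
        have : b ^ (k - 1) * b = b ^ k := by
          rw [← pow_succ]; congr 1; omega
        omega
      have := ih (v / b) (Nat.div_lt_self (by omega) (by omega)) (k - 1) (by omega) hdiv
      simp [List.length_append]
      omega

theorem fixedD_snoc (b k v : Nat) :
    fixedD b (k + 1) v = fixedD b k (v / b) ++ [digChar (v % b)] := by
  unfold fixedD
  rw [List.range_succ, List.map_append]
  congr 1
  · apply List.map_congr_left
    intro j hj
    simp only [List.mem_range] at hj
    congr 2
    rw [Nat.div_div_eq_div_mul, ← pow_succ']
    congr 2
    omega
  · simp

theorem fixedD_zero (b k : Nat) : fixedD b k 0 = List.replicate k '0' := by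
  unfold fixedD
  rw [List.eq_replicate_iff]
  constructor
  · simp
  · intro c hc
    simp only [List.mem_map] at hc
    obtain ⟨j, _, hj⟩ := hc
    simp [digChar, ← hj]

theorem rjust_pyDigits_eq_fixedD (b k v : Nat) (hb : 2 ≤ b) (hk : 1 ≤ k) (hv : v < b ^ k) :
    rjustZ k (pyDigits b v) = fixedD b k v := by
  induction k generalizing v with
  | zero => omega
  | succ k ih =>
    rw [pyDigits]
    split
    · rename_i h
      have hvb : v < b := by omega
      rw [fixedD_snoc, Nat.div_eq_of_lt hvb, Nat.mod_eq_of_lt hvb, fixedD_zero]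
      simp [rjustZ]
    · rename_i h
      simp only [not_or, not_lt, not_le] at h
      obtain ⟨h1, h2⟩ := h
      have hk1 : 1 ≤ k := by
        by_contra hk0
        have : k = 0 := by omega
        subst this
        simp at hv
        omega
      have hdiv : v / b < b ^ k := by
        rw [Nat.div_lt_iff_lt_mul (by omega)]
        have : b ^ k * b = b ^ (k + 1) := by rw [← pow_succ]
        omega
      have hlen : (pyDigits b (v / b)).length ≤ k := pyDigits_length_le b (v / b) k hb hk1 hdiv
      have : rjustZ (k + 1) (pyDigits b (v / b) ++ [digChar (v % b)])
          = rjustZ k (pyDigits b (v / b)) ++ [digChar (v % b)] := by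
        unfold rjustZ
        simp only [List.length_append, List.length_cons, List.length_nil, Nat.zero_add]
        rw [show k + 1 - ((pyDigits b (v / b)).length + 1)
            = k - (pyDigits b (v / b)).length from by omega, List.append_assoc]
      rw [this, ih (v / b) hk1 hdiv, fixedD_snoc]

theorem parseB_fixedD (b k v : Nat) (hb : 2 ≤ b) (hb16 : b ≤ 16) :
    parseB b (fixedD b k v) = v % b ^ k := by
  induction k generalizing v with
  | zero => simp [fixedD, parseB, Nat.mod_one]
  | succ k ih =>
    rw [fixedD_snoc, parseB_append, ih]
    have hvb : v % b < 16 := by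
      have := Nat.mod_lt v (show 0 < b by omega)
      omega
    have h1 : parseB b [digChar (v % b)] = hexVal (digChar (v % b)) := by
      simp [parseB]
    rw [h1, hexVal_digChar _ hvb]
    rw [pow_succ']
    rw [Nat.mod_mul]
    simp
    ring

theorem fixedD_split (b k m v : Nat) (hm : m ≤ k) :
    fixedD b k v = fixedD b m (v / b ^ (k - m)) ++ fixedD b (k - m) v := by
  apply List.ext_getElem
  · simp [fixedD]; omega
  · intro i h1 h2
    simp only [fixedD, List.length_map, List.length_range] at h1 ⊢
    rw [List.getElem_map, List.getElem_range]
    rcases Nat.lt_or_ge i m with hlt | hge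
    · rw [List.getElem_append_left (by simp [fixedD]; omega)]
      simp only [fixedD, List.getElem_map, List.getElem_range]
      rw [Nat.div_div_eq_div_mul, ← pow_add,
        show k - m + (m - 1 - i) = k - 1 - i from by omega]
    · rw [List.getElem_append_right (by simp [fixedD]; omega)]
      simp only [fixedD, List.length_map, List.length_range, List.getElem_map, List.getElem_range]
      rw [show k - m - 1 - (i - m) = k - 1 - i from by omega]

theorem fixedD_getD (b k v j : Nat) (hj : j < k) :
    (fixedD b k v).getD j '0' = digChar (v / b ^ (k - 1 - j) % b) := by
  rw [List.getD_eq_getElem _ _ (by simp [fixedD]; omega)]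
  simp [fixedD]

theorem parseB_nib (s : List Char) (j : Nat) (hj : j < s.length)
    (h : ∀ c ∈ s, isHexC c = true) :
    parseB 16 s / 16 ^ (s.length - 1 - j) % 16 = hexVal (s.getD j '0') := by
  induction s generalizing j with
  | nil => simp at hj
  | cons c t ih =>
    have hsplit : parseB 16 (c :: t) = hexVal c * 16 ^ t.length + parseB 16 t := by
      have h1 : parseB 16 (c :: t) = t.foldl (fun a c => a * 16 + hexVal c) (0 * 16 + hexVal c) := rfl
      rw [h1, parseB_from]
      ring
    have ht : parseB 16 t < 16 ^ t.length :=
      parseB_lt 16 (by omega) t (fun c hc => hexVal_lt_of_isHexDigit c (h c (by simp [hc])))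
    have hc : hexVal c < 16 := hexVal_lt_of_isHexDigit c (h c (by simp))
    cases j with
    | zero =>
      simp only [List.length_cons, List.getD_cons_zero]
      rw [hsplit, show t.length + 1 - 1 - 0 = t.length from by omega,
        show hexVal c * 16 ^ t.length + parseB 16 t
          = 16 ^ t.length * hexVal c + parseB 16 t from by ring,
        Nat.mul_add_div (by positivity), Nat.div_eq_of_lt ht, Nat.add_zero,
        Nat.mod_eq_of_lt hc]
    | succ j =>
      simp only [List.length_cons, List.getD_cons_succ]
      have hjt : j < t.length := by simp at hj; omega
      rw [hsplit, show t.length + 1 - 1 - (j + 1) = t.length - 1 - j from by omega]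
      have hsplitpow : (16:Nat) ^ t.length = 16 ^ (t.length - 1 - j) * 16 ^ (j + 1) := by
        rw [← pow_add]; congr 1; omega
      rw [hsplitpow,
        show hexVal c * (16 ^ (t.length - 1 - j) * 16 ^ (j + 1)) + parseB 16 t
          = 16 ^ (t.length - 1 - j) * (hexVal c * 16 ^ (j + 1)) + parseB 16 t from by ring,
        Nat.mul_add_div (by positivity),
        show hexVal c * 16 ^ (j + 1) + parseB 16 t / 16 ^ (t.length - 1 - j)
          = 16 * (hexVal c * 16 ^ j) + parseB 16 t / 16 ^ (t.length - 1 - j) from by ring,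
        Nat.mul_add_mod]
      exact ih j hjt (fun c hc => h c (by simp [hc]))

theorem div_pow_mod_xor (x y m t : Nat) :
    (x ^^^ y) / 2 ^ m % 2 ^ t = (x / 2 ^ m % 2 ^ t) ^^^ (y / 2 ^ m % 2 ^ t) := by
  apply Nat.eq_of_testBit_eq
  intro i
  simp only [Nat.testBit_mod_two_pow, ← Nat.shiftRight_eq_div_pow, Nat.testBit_shiftRight,
    Nat.testBit_xor]
  by_cases h : i < t <;> simp [h]

theorem lor_mul_pow_add (a c n : Nat) (hc : c < 2 ^ n) : (a * 2 ^ n) ||| c = a * 2 ^ n + c := by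
  apply Nat.eq_of_testBit_eq
  intro i
  rw [show a * 2 ^ n + c = 2 ^ n * a + c from by ring, Nat.testBit_two_pow_mul_add a hc i]
  rw [Nat.testBit_or, ← Nat.shiftLeft_eq, Nat.testBit_shiftLeft]
  by_cases h : i < n
  · simp [h, Nat.not_le.mpr h]
  · have : c.testBit i = false := Nat.testBit_lt_two_pow (lt_of_lt_of_le hc (Nat.pow_le_pow_right (by omega) (by omega)))
    simp [h, Nat.le_of_not_lt, this, Nat.not_lt.mpr (Nat.le_of_not_lt h)]

-- generic helpers for the equivalence proof

theorem flatten_map_single {α β : Type} (l : List α) (f : α → β) :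
    (l.map (fun x => [f x])).flatten = l.map f := by
  induction l with
  | nil => rfl
  | cons x t ih => simp [ih]

theorem foldl_rel {α β γ : Type} (R : α → β → Prop) (f : α → γ → α) (g : β → γ → β)
    (l : List γ) (a : α) (b : β) (h : R a b)
    (hs : ∀ a b c, c ∈ l → R a b → R (f a c) (g b c)) :
    R (l.foldl f a) (l.foldl g b) := by
  induction l generalizing a b with
  | nil => exact h
  | cons c t ih =>
    exact ih _ _ (hs a b c (by simp) h) (fun a b c hc hr => hs a b c (by simp [hc]) hr)

theorem foldl_ext_mem {α β : Type} (l : List α) (f g : β → α → β) (a : β)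
    (h : ∀ b x, x ∈ l → f b x = g b x) : l.foldl f a = l.foldl g a := by
  induction l generalizing a with
  | nil => rfl
  | cons x t ih =>
    simp only [List.foldl_cons]
    rw [h a x (by simp)]
    exact ih _ (fun b x hx => h b x (by simp [hx]))

theorem foldl_getD_range {α β : Type} (l : List α) (d : α) (f : β → α → β) (a : β) :
    l.foldl f a = (List.range l.length).foldl (fun acc i => f acc (l.getD i d)) a := by
  induction l generalizing a with
  | nil => rfl
  | cons x t ih =>
    simp only [List.length_cons, List.range_succ_eq_map, List.foldl_cons, List.foldl_map,
      List.getD_cons_zero]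
    rw [ih]
    have he : (fun (acc : β) (i : Nat) => f acc ((x :: t).getD i.succ d))
        = fun (acc : β) (i : Nat) => f acc (t.getD i d) := by
      funext acc i
      simp [List.getD_cons_succ]
    rw [he]

theorem parseB_fold_digits_aux {γ : Type} (b : Nat) (l : List γ) (f : γ → Nat)
    (hf : ∀ i ∈ l, f i < 16) (t0 : List Char) :
    parseB b (l.foldl (fun t i => t ++ [digChar (f i)]) t0)
      = l.foldl (fun a i => a * b + f i) (parseB b t0) := by
  induction l generalizing t0 with
  | nil => rfl
  | cons x t ih =>
    simp only [List.foldl_cons]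
    rw [ih (fun i hi => hf i (by simp [hi]))]
    congr 1
    rw [parseB_append]
    have h1 : parseB b [digChar (f x)] = f x := by
      show (0 : Nat) * b + hexVal (digChar (f x)) = f x
      rw [hexVal_digChar _ (hf x (by simp))]
      ring
    rw [h1]
    simp

theorem parseB_fold_digits {γ : Type} (b : Nat) (l : List γ) (f : γ → Nat)
    (hf : ∀ i ∈ l, f i < 16) :
    parseB b (l.foldl (fun t i => t ++ [digChar (f i)]) [])
      = l.foldl (fun a i => a * b + f i) 0 := by
  have := parseB_fold_digits_aux b l f hf []
  simpa [parseB] using this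

theorem parseB_map_digChar_aux {γ : Type} (b : Nat) (l : List γ) (f : γ → Nat)
    (hf : ∀ i ∈ l, f i < 16) (a : Nat) :
    (l.map (fun x => digChar (f x))).foldl (fun a c => a * b + hexVal c) a
      = l.foldl (fun a x => a * b + f x) a := by
  induction l generalizing a with
  | nil => rfl
  | cons x t ih =>
    simp only [List.map_cons, List.foldl_cons]
    rw [hexVal_digChar _ (hf x (by simp))]
    exact ih (fun i hi => hf i (by simp [hi])) _

theorem parseB_map_digChar {γ : Type} (b : Nat) (l : List γ) (f : γ → Nat)
    (hf : ∀ i ∈ l, f i < 16) :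
    parseB b (l.map (fun x => digChar (f x))) = l.foldl (fun a x => a * b + f x) 0 :=
  parseB_map_digChar_aux b l f hf 0

theorem getD_set_self {α : Type} (l : List α) (i : Nat) (a d : α) (h : i < l.length) :
    (l.set i a).getD i d = a := by
  simp [List.getD_eq_getElem?_getD, h]

theorem getD_set_ne {α : Type} (l : List α) (i j : Nat) (a d : α) (h : i ≠ j) :
    (l.set i a).getD j d = l.getD j d := by
  simp [List.getD_eq_getElem?_getD, List.getElem?_set_ne h]

theorem getD_append_left {α : Type} (l1 l2 : List α) (j : Nat) (d : α) (h : j < l1.length) :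
    (l1 ++ l2).getD j d = l1.getD j d := by
  simp [List.getD_eq_getElem?_getD, List.getElem?_append_left h]

theorem getD_append_right {α : Type} (l1 l2 : List α) (j : Nat) (d : α) (h : l1.length ≤ j) :
    (l1 ++ l2).getD j d = l2.getD (j - l1.length) d := by
  simp [List.getD_eq_getElem?_getD, List.getElem?_append_right h]

theorem getD_drop {α : Type} (l : List α) (n i : Nat) (d : α) :
    (l.drop n).getD i d = l.getD (n + i) d := by
  simp [List.getD_eq_getElem?_getD, List.getElem?_drop]

theorem rjustZ_length (k : Nat) (s : List Char) (h : s.length ≤ k) :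
    (rjustZ k s).length = k := by
  simp [rjustZ]
  omega

theorem rjustZ_parse (b k : Nat) (s : List Char) : parseB b (rjustZ k s) = parseB b s :=
  parseB_replicate_zero b _ s

theorem rjustZ_hex (k : Nat) (s : List Char) (h : ∀ c ∈ s, isHexC c = true) :
    ∀ c ∈ rjustZ k s, isHexC c = true := by
  intro c hc
  rcases List.mem_append.mp hc with h0 | h0
  · rw [List.eq_of_mem_replicate h0]
    decide
  · exact h c h0

theorem pyDigits_hex (b v : Nat) (hb2 : 2 ≤ b) (hb : b ≤ 16) :
    ∀ c ∈ pyDigits b v, isHexC c = true := by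
  induction v using Nat.strong_induction_on with
  | _ v ih =>
    rw [pyDigits]
    split
    · rename_i h
      intro c hc
      simp only [List.mem_singleton] at hc
      subst hc
      exact isHexC_digChar v (by omega)
    · rename_i h
      simp only [not_or, not_lt, not_le] at h
      intro c hc
      rcases List.mem_append.mp hc with h0 | h0
      · exact ih (v / b) (Nat.div_lt_self (by omega) (by omega)) c h0
      · simp only [List.mem_singleton] at h0
        subst h0
        exact isHexC_digChar _ (by have := Nat.mod_lt v (show 0 < b by omega); omega)

theorem parseB_pyDigits (b v : Nat) (hb2 : 2 ≤ b) (hb : b ≤ 16) :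
    parseB b (pyDigits b v) = v := by
  have hvk : v < b ^ (v + 1) := by
    have h1 : v < 2 ^ (v + 1) :=
      lt_of_lt_of_le Nat.lt_two_pow_self (Nat.pow_le_pow_right (by omega) (by omega))
    exact lt_of_lt_of_le h1 (Nat.pow_le_pow_left hb2 _)
  have h := rjust_pyDigits_eq_fixedD b (v + 1) v hb2 (by omega) hvk
  have h2 := rjustZ_parse b (v + 1) (pyDigits b v)
  rw [h] at h2
  rw [← h2, parseB_fixedD b _ v hb2 hb, Nat.mod_eq_of_lt hvk]

theorem fixedD_hex (b k v : Nat) (hb2 : 2 ≤ b) (hb : b ≤ 16) :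
    ∀ c ∈ fixedD b k v, isHexC c = true := by
  intro c hc
  simp only [fixedD, List.mem_map] at hc
  obtain ⟨j, _, hj⟩ := hc
  subst hj
  exact isHexC_digChar _ (by have := Nat.mod_lt (v / b ^ (k - 1 - j)) (show 0 < b by omega); omega)

theorem fixedD16_hex8 (v : Nat) : Hex8 (fixedD 16 8 v) := by
  constructor
  · simp [fixedD]
  · exact fixedD_hex 16 8 v (by omega) (by omega)

theorem parseB_fixedD16 (v : Nat) (hv : v < 2 ^ 32) : parseB 16 (fixedD 16 8 v) = v := by
  rw [parseB_fixedD 16 8 v (by omega) (by omega)]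
  exact Nat.mod_eq_of_lt (by norm_num at hv ⊢; omega)

theorem hex8_val_lt (s : List Char) (h : Hex8 s) : parseB 16 s < 2 ^ 32 := by
  obtain ⟨hl, hc⟩ := h
  have h1 := parseB_lt 16 (by omega) s (fun c hcm => hexVal_lt_of_isHexDigit c (hc c hcm))
  have h2 : (16 : Nat) ^ s.length ≤ 16 ^ 8 := Nat.pow_le_pow_right (by omega) hl
  norm_num at h2 ⊢
  omega

theorem word4_spec (n : Nat) (hn : n < 256) :
    Hex8 (word4 n) ∧ parseB 16 (word4 n) = n := by
  refine ⟨⟨?_, ?_⟩, ?_⟩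
  · have := pyDigits_length_le 16 n 2 (by omega) (by omega) (by norm_num; omega)
    simp [word4]
    omega
  · intro c hc
    rcases List.mem_append.mp hc with h0 | h0
    · rw [List.eq_of_mem_replicate h0]; decide
    · exact pyDigits_hex 16 n (by omega) (by omega) c h0
  · show parseB 16 (List.replicate 6 '0' ++ pyDigits 16 n) = n
    rw [parseB_replicate_zero, parseB_pyDigits 16 n (by omega) (by omega)]

set_option maxRecDepth 100000 in
theorem Gstr_parse : parseB 16 Gstr = 2654435769 := by decide

set_option maxRecDepth 8192 in
theorem Gstr_spec : Gstr.length = 8 ∧ (∀ c ∈ Gstr, isHexC c = true) ∧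
    parseB 16 Gstr = 2654435769 :=
  ⟨rfl, by intro c hc; fin_cases hc <;> decide, Gstr_parse⟩

theorem xor_func_single (a d : Char) (ha : hexVal a < 16) (hd : hexVal d < 16) :
    xor_func [a] [d] = [digChar (hexVal a ^^^ hexVal d)] := by
  have hx : hexVal a ^^^ hexVal d < 16 := by
    have h4 : hexVal a ^^^ hexVal d < 2 ^ 4 := Nat.xor_lt_two_pow (by omega) (by omega)
    omega
  have hpa : parseB 16 [a] = hexVal a := by simp [parseB]
  have hpd : parseB 16 [d] = hexVal d := by simp [parseB]
  unfold xor_func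
  rw [hpa, hpd, pyDigits, dif_pos (Or.inl hx)]

theorem nib16_xor (x y m : Nat) :
    (x ^^^ y) / 16 ^ m % 16 = (x / 16 ^ m % 16) ^^^ (y / 16 ^ m % 16) := by
  have h : (16 : Nat) = 2 ^ 4 := by norm_num
  simp only [h, ← pow_mul]
  exact div_pow_mod_xor x y (4 * m) 4

theorem hexC_getD (s : List Char) (j : Nat) (hj : j < s.length)
    (h : ∀ c ∈ s, isHexC c = true) : isHexC (s.getD j '0') = true := by
  rw [List.getD_eq_getElem _ _ hj]
  exact h _ (List.getElem_mem hj)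

theorem zipStar_uniform (n : Nat) : ∀ (ls : List (List Char)), ls ≠ [] →
    (∀ s ∈ ls, s.length = n) →
    zipStar ls = (List.range n).map (fun j => ls.map (fun s => s.getD j '0')) := by
  induction n with
  | zero =>
    intro ls hne hlen
    cases ls with
    | nil => exact absurd rfl hne
    | cons s t =>
      have hs : s = [] := List.length_eq_zero_iff.mp (hlen s (by simp))
      rw [zipStar, dif_pos (Or.inr (by simp [hs]))]
      simp
  | succ n ih =>
    intro ls hne hlen
    have hcond : ¬ (ls.isEmpty = true ∨ ls.any List.isEmpty = true) := by
      rintro (h0 | h0)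
      · exact hne (List.isEmpty_iff.mp h0)
      · obtain ⟨s, hs, hse⟩ := List.any_eq_true.mp h0
        have := hlen s hs
        rw [List.isEmpty_iff.mp hse] at this
        simp at this
    rw [zipStar, dif_neg hcond]
    rw [ih (ls.map List.tail) (by simp [hne])
      (by
        intro s hs
        simp only [List.mem_map] at hs
        obtain ⟨t, ht, rfl⟩ := hs
        rw [List.length_tail, hlen t ht]
        omega)]
    rw [List.range_succ_eq_map, List.map_cons]
    congr 1
    · apply List.map_congr_left
      intro s _
      cases s <;> simp
    · rw [List.map_map]
      apply List.map_congr_left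
      intro j _
      rw [List.map_map]
      apply List.map_congr_left
      intro s _
      cases s <;> simp

theorem zip_add_eq (args : List (List Char)) :
    zip_add args = zipStar (args.map (fun s =>
      List.replicate ((args.foldl (fun m s => if m < s.length then s.length else m) 0) - s.length) '0' ++ s)) := rfl

theorem zip_add_six (s1 s2 s3 s4 s5 s6 : List Char)
    (h1 : s1.length ≤ 8) (h2 : s2.length ≤ 8) (h3 : s3.length ≤ 8) (h4 : s4.length ≤ 8)
    (h5 : s5.length = 8) (h6 : s6.length ≤ 8) :
    zip_add [s1, s2, s3, s4, s5, s6] = (List.range 8).map (fun j =>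
      [(rjustZ 8 s1).getD j '0', (rjustZ 8 s2).getD j '0', (rjustZ 8 s3).getD j '0',
       (rjustZ 8 s4).getD j '0', (rjustZ 8 s5).getD j '0', (rjustZ 8 s6).getD j '0']) := by
  rw [zip_add_eq]
  have hmax : [s1, s2, s3, s4, s5, s6].foldl (fun m s => if m < s.length then s.length else m) 0 = 8 := by
    simp only [List.foldl_cons, List.foldl_nil]
    split_ifs <;> omega
  rw [hmax]
  simp only [List.map_cons, List.map_nil]
  have hps : ∀ s : List Char, List.replicate (8 - s.length) '0' ++ s = rjustZ 8 s := fun _ => rfl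
  simp only [hps]
  rw [zipStar_uniform 8 _ (by simp)
    (by
      intro s hs
      have hr : ∀ t : List Char, t.length ≤ 8 → (rjustZ 8 t).length = 8 := fun t ht => rjustZ_length 8 t ht
      simp only [List.mem_cons, List.not_mem_nil, or_false] at hs
      rcases hs with rfl | rfl | rfl | rfl | rfl | rfl
      · exact hr _ h1
      · exact hr _ h2
      · exact hr _ h3
      · exact hr _ h4
      · exact hr _ (by omega)
      · exact hr _ h6)]
  apply List.map_congr_left
  intro j _
  simp

theorem reduceXor_six (c1 c2 c3 c4 c5 c6 : Char)
    (h1 : hexVal c1 < 16) (h2 : hexVal c2 < 16) (h3 : hexVal c3 < 16) (h4 : hexVal c4 < 16)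
    (h5 : hexVal c5 < 16) (h6 : hexVal c6 < 16) :
    reduceXor [c1, c2, c3, c4, c5, c6]
      = [digChar (((((hexVal c1 ^^^ hexVal c2) ^^^ hexVal c3) ^^^ hexVal c4) ^^^ hexVal c5) ^^^ hexVal c6)] := by
  have hx : ∀ a b : Nat, a < 16 → b < 16 → a ^^^ b < 16 := by
    intro a b ha hb
    have : a ^^^ b < 2 ^ 4 := Nat.xor_lt_two_pow (by omega) (by omega)
    omega
  show List.foldl (fun acc d => xor_func acc [d]) [c1] [c2, c3, c4, c5, c6] = _
  simp only [List.foldl_cons, List.foldl_nil]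
  rw [xor_func_single c1 c2 h1 h2]
  rw [xor_func_single _ c3 (by rw [hexVal_digChar _ (hx _ _ h1 h2)]; exact hx _ _ h1 h2) h3,
    hexVal_digChar _ (hx _ _ h1 h2)]
  rw [xor_func_single _ c4 (by rw [hexVal_digChar _ (hx _ _ (hx _ _ h1 h2) h3)]; exact hx _ _ (hx _ _ h1 h2) h3) h4,
    hexVal_digChar _ (hx _ _ (hx _ _ h1 h2) h3)]
  rw [xor_func_single _ c5 (by rw [hexVal_digChar _ (hx _ _ (hx _ _ (hx _ _ h1 h2) h3) h4)]; exact hx _ _ (hx _ _ (hx _ _ h1 h2) h3) h4) h5,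
    hexVal_digChar _ (hx _ _ (hx _ _ (hx _ _ h1 h2) h3) h4)]
  rw [xor_func_single _ c6 (by rw [hexVal_digChar _ (hx _ _ (hx _ _ (hx _ _ (hx _ _ h1 h2) h3) h4) h5)]; exact hx _ _ (hx _ _ (hx _ _ (hx _ _ h1 h2) h3) h4) h5) h6,
    hexVal_digChar _ (hx _ _ (hx _ _ (hx _ _ (hx _ _ h1 h2) h3) h4) h5)]

theorem byte_xor_spec (s1 s2 s3 s4 s5 s6 : List Char)
    (h1 : Hex8 s1) (h2 : Hex8 s2) (h3 : Hex8 s3) (h4 : Hex8 s4)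
    (h5 : Hex8 s5) (hlen5 : s5.length = 8) (h6 : Hex8 s6) :
    byte_xor [s1, s2, s3, s4, s5, s6]
      = fixedD 16 8 (((((parseB 16 s1 ^^^ parseB 16 s2) ^^^ parseB 16 s3) ^^^ parseB 16 s4)
          ^^^ parseB 16 s5) ^^^ parseB 16 s6) := by
  unfold byte_xor
  rw [zip_add_six s1 s2 s3 s4 s5 s6 h1.1 h2.1 h3.1 h4.1 hlen5 h6.1, List.map_map]
  have hnib : ∀ s : List Char, Hex8 s → ∀ j, j < 8 →
      hexVal ((rjustZ 8 s).getD j '0') = parseB 16 s / 16 ^ (8 - 1 - j) % 16 := by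
    intro s hs j hj
    have hlen : (rjustZ 8 s).length = 8 := rjustZ_length 8 s hs.1
    have hhex : ∀ c ∈ rjustZ 8 s, isHexC c = true := rjustZ_hex 8 s hs.2
    have := parseB_nib (rjustZ 8 s) j (by omega) hhex
    rw [hlen] at this
    rw [← this, rjustZ_parse]
  have hcol : ∀ j ∈ List.range 8,
      (reduceXor ∘ fun j =>
        [(rjustZ 8 s1).getD j '0', (rjustZ 8 s2).getD j '0', (rjustZ 8 s3).getD j '0',
         (rjustZ 8 s4).getD j '0', (rjustZ 8 s5).getD j '0', (rjustZ 8 s6).getD j '0']) j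
      = [digChar ((((((parseB 16 s1 ^^^ parseB 16 s2) ^^^ parseB 16 s3) ^^^ parseB 16 s4)
          ^^^ parseB 16 s5) ^^^ parseB 16 s6) / 16 ^ (8 - 1 - j) % 16)] := by
    intro j hj
    simp only [List.mem_range] at hj
    have hg : ∀ s : List Char, Hex8 s → hexVal ((rjustZ 8 s).getD j '0') < 16 := by
      intro s hs
      exact hexVal_lt_of_isHexDigit _ (hexC_getD _ j (by rw [rjustZ_length 8 s hs.1]; omega) (rjustZ_hex 8 s hs.2))
    simp only [Function.comp]
    rw [reduceXor_six _ _ _ _ _ _ (hg _ h1) (hg _ h2) (hg _ h3) (hg _ h4) (hg _ h5) (hg _ h6)]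
    rw [hnib s1 h1 j hj, hnib s2 h2 j hj, hnib s3 h3 j hj, hnib s4 h4 j hj,
      hnib s5 h5 j hj, hnib s6 h6 j hj]
    rw [← nib16_xor, ← nib16_xor, ← nib16_xor, ← nib16_xor, ← nib16_xor]
  rw [List.map_congr_left hcol, flatten_map_single]
  rfl

theorem cyclic_shift_spec (v : Nat) (hv : v < 2 ^ 32) :
    cyclic_shift (fixedD 16 8 v) 11 = fixedD 16 8 (rotl11 v) ∧ rotl11 v < 2 ^ 32 := by
  have hrot_val : rotl11 v = (v % 2 ^ 21) * 2 ^ 11 + v / 2 ^ 21 := by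
    unfold rotl11
    rw [Nat.shiftLeft_eq, Nat.shiftRight_eq_div_pow,
      show (0xFFFFFFFF : Nat) = 2 ^ 32 - 1 from by norm_num,
      Nat.and_two_pow_sub_one_eq_mod,
      show (2 : Nat) ^ 32 = 2 ^ 21 * 2 ^ 11 from by norm_num,
      Nat.mul_mod_mul_right]
    exact lor_mul_pow_add (v % 2 ^ 21) (v / 2 ^ 21) 11
      (by
        have h1 : v < 2 ^ 21 * 2 ^ 11 := by norm_num at hv ⊢; omega
        exact Nat.div_lt_of_lt_mul (by omega))
  have hdivlt : v / 2 ^ 21 < 2 ^ 11 := Nat.div_lt_of_lt_mul (by norm_num at hv ⊢; omega)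
  have hrot_lt : rotl11 v < 2 ^ 32 := by
    rw [hrot_val]
    have hm : v % 2 ^ 21 < 2 ^ 21 := Nat.mod_lt v (by norm_num)
    norm_num at hm hdivlt ⊢
    omega
  refine ⟨?_, hrot_lt⟩
  unfold cyclic_shift
  rw [parseB_fixedD16 v hv,
    rjust_pyDigits_eq_fixedD 2 32 v (by omega) (by omega) hv]
  have hsplit := fixedD_split 2 32 11 v (by omega)
  rw [show (32 : Nat) - 11 = 21 from by norm_num] at hsplit
  rw [hsplit]
  show rjustZ 8 (pyDigits 16 (parseB 2
    (List.drop 11 (fixedD 2 11 (v / 2 ^ 21) ++ fixedD 2 21 v) ++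
     List.take 11 (fixedD 2 11 (v / 2 ^ 21) ++ fixedD 2 21 v)))) = fixedD 16 8 (rotl11 v)
  rw [List.drop_left' (fixedD_length 2 11 (v / 2 ^ 21)),
    List.take_left' (fixedD_length 2 11 (v / 2 ^ 21)),
    parseB_append, fixedD_length,
    parseB_fixedD 2 21 v (by omega) (by omega),
    parseB_fixedD 2 11 (v / 2 ^ 21) (by omega) (by omega),
    Nat.mod_eq_of_lt hdivlt, ← hrot_val]
  exact rjust_pyDigits_eq_fixedD 16 8 (rotl11 v) (by omega) (by omega)
    (by norm_num at hrot_lt ⊢; omega)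

theorem row_lt (r : Nat) (hr : r < 8) : ∀ n < 16, (S_table.getD r []).getD n 0 < 16 := by
  interval_cases r <;> decide

theorem sboxWord_eq (row : List Nat) (hrow : ∀ n < 16, row.getD n 0 < 16) (v : Nat) :
    sboxWord row v
      = (List.range 8).foldl (fun a j => a * 16 + row.getD (v / 16 ^ (8 - 1 - j) % 16) 0) 0 := by
  unfold sboxWord
  apply foldl_ext_mem
  intro b j hj
  simp only [List.mem_range] at hj
  have hsh : (v >>> (28 - 4 * j)) &&& 0xF = v / 16 ^ (8 - 1 - j) % 16 := by
    rw [show (0xF : Nat) = 2 ^ 4 - 1 from by norm_num, Nat.and_two_pow_sub_one_eq_mod,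
      Nat.shiftRight_eq_div_pow, show 28 - 4 * j = 4 * (8 - 1 - j) from by omega, pow_mul,
      show ((2 : Nat) ^ 4) = 16 from by norm_num]
  rw [hsh, Nat.shiftLeft_eq,
    lor_mul_pow_add b _ 4 (by
      rw [show ((2 : Nat) ^ 4) = 16 from by norm_num]
      exact hrow _ (Nat.mod_lt (v / 16 ^ (8 - 1 - j)) (show 0 < 16 by norm_num)))]
  norm_num

theorem foldl_digits_lt {γ : Type} (l : List γ) (f : γ → Nat) (hf : ∀ x ∈ l, f x < 16) :
    ∀ a K, a < K → l.foldl (fun a x => a * 16 + f x) a < K * 16 ^ l.length := by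
  induction l with
  | nil =>
    intro a K h
    simpa using h
  | cons x t ih =>
    intro a K h
    simp only [List.foldl_cons, List.length_cons]
    have hstep : a * 16 + f x < K * 16 := by
      have hfx := hf x (by simp)
      omega
    have := ih (fun y hy => hf y (by simp [hy])) (a * 16 + f x) (K * 16) hstep
    rw [show K * 16 ^ (t.length + 1) = K * 16 * 16 ^ t.length from by ring]
    exact this

theorem sboxWord_lt (row : List Nat) (hrow : ∀ n < 16, row.getD n 0 < 16) (v : Nat) :
    sboxWord row v < 2 ^ 32 := by
  rw [sboxWord_eq row hrow v]
  have := foldl_digits_lt (List.range 8) (fun j => row.getD (v / 16 ^ (8 - 1 - j) % 16) 0)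
    (fun j _ => hrow _ (Nat.mod_lt _ (by norm_num))) 0 1 (by omega)
  norm_num at this ⊢
  omega

theorem sbox_arg_eq (r v : Nat) (hr : r < 8) :
    (fixedD 16 8 v).foldl (fun s c => s ++ pyDigits 16 ((S_table.getD r []).getD (hexVal c) 0)) []
      = (List.range 8).map (fun j => digChar ((S_table.getD r []).getD (v / 16 ^ (8 - 1 - j) % 16) 0)) := by
  rw [← List.flatMap_eq_foldl]
  unfold fixedD
  rw [List.flatMap_map]
  have hfun : (fun j => pyDigits 16 ((S_table.getD r []).getD (hexVal (digChar (v / 16 ^ (8 - 1 - j) % 16))) 0))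
      = fun j => [digChar ((S_table.getD r []).getD (v / 16 ^ (8 - 1 - j) % 16) 0)] := by
    funext j
    rw [hexVal_digChar _ (Nat.mod_lt _ (by norm_num))]
    rw [pyDigits, dif_pos (Or.inl (row_lt r hr _ (Nat.mod_lt _ (by norm_num))))]
  rw [hfun, ← List.map_eq_flatMap]

theorem parse_sbox_arg (r v : Nat) (hr : r < 8) :
    parseB 16 ((List.range 8).map (fun j => digChar ((S_table.getD r []).getD (v / 16 ^ (8 - 1 - j) % 16) 0)))
      = sboxWord (S_table.getD r []) v := by
  rw [parseB_map_digChar 16 _ _ (fun j _ => row_lt r hr _ (Nat.mod_lt _ (by norm_num)))]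
  rw [sboxWord_eq _ (row_lt r hr) v]

theorem permuteIP_eq (X : Nat) :
    permuteIP X
      = (List.range 128).foldl (fun a idx => a * 2 + X / 2 ^ (128 - 1 - IPTable.getD idx 0) % 2) 0 := by
  unfold permuteIP
  rw [foldl_getD_range IPTable 0 _ 0, show IPTable.length = 128 from by simp [IPTable]]
  apply foldl_ext_mem
  intro b idx hidx
  rw [Nat.and_one_is_mod, Nat.shiftRight_eq_div_pow, Nat.shiftLeft_eq,
    lor_mul_pow_add b _ 1 (by
      have := Nat.mod_lt (X / 2 ^ (127 - IPTable.getD idx 0)) (show 0 < 2 by norm_num)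
      norm_num
      omega),
    show 128 - 1 - IPTable.getD idx 0 = 127 - IPTable.getD idx 0 from by omega]
  norm_num

theorem ip_eq (s : List Char) (X : Nat) (hs : parseB 16 s = X) (hX : X < 2 ^ 128) :
    ip s = pyDigits 16 (permuteIP X) := by
  show pyDigits 16 (parseB 2 ((List.range 128).foldl
    (fun t idx => t ++ [(rjustZ 128 (pyDigits 2 (parseB 16 s))).getD (IPTable.getD idx 0) '0']) []))
      = pyDigits 16 (permuteIP X)
  rw [hs, rjust_pyDigits_eq_fixedD 2 128 X (by omega) (by omega) hX]
  have hIPlt : ∀ idx, idx < 128 → IPTable.getD idx 0 < 128 := by decide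
  have hfold : (List.range 128).foldl
      (fun t idx => t ++ [(fixedD 2 128 X).getD (IPTable.getD idx 0) '0']) []
      = (List.range 128).foldl
        (fun t idx => t ++ [digChar (X / 2 ^ (128 - 1 - IPTable.getD idx 0) % 2)]) [] := by
    apply foldl_ext_mem
    intro b idx hidx
    simp only [List.mem_range] at hidx
    rw [fixedD_getD 2 128 X _ (hIPlt idx hidx)]
  rw [hfold, parseB_fold_digits 2 _ _ (fun idx _ => by
    have := Nat.mod_lt (X / 2 ^ (128 - 1 - IPTable.getD idx 0)) (show 0 < 2 by norm_num)
    omega)]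
  rw [← permuteIP_eq]

theorem ridx_lt (i : Nat) : (PySem.Int.mod (11 - (i : Int)) 8).toNat < 8 := by
  have h1 := PySem.Int.mod_nonneg (11 - (i : Int)) (b := 8) (by omega)
  have h2 := PySem.Int.mod_lt (11 - (i : Int)) (b := 8) (by omega)
  omega

theorem step_rel (i j : Nat) (hi : i < 33) (hj : j < 4) (wA : List (List Char)) (wB : List Nat)
    (h : WRel wA wB) :
    WRel (stepA i wA j) (stepB i wB j) ∧
    (stepA i wA j).getD (j + 8) [] = fixedD 16 8 ((stepB i wB j).getD (j + 8) 0) ∧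
    (stepB i wB j).getD (j + 8) 0 < 2 ^ 32 := by
  obtain ⟨hlA, hlB, hw⟩ := h
  have hG := Gstr_spec
  have hword := word4_spec (4 * i + j) (by omega)
  have hv32 : ∀ jj : Nat, wB.getD jj 0 < 2 ^ 32 := by
    intro jj
    rw [← (hw jj).2]
    exact hex8_val_lt _ (hw jj).1
  have hbx : byte_xor [wA.getD j [], wA.getD (j + 3) [], wA.getD (j + 5) [], wA.getD (j + 7) [],
      Gstr, word4 (4 * i + j)]
      = fixedD 16 8 (((((wB.getD j 0 ^^^ wB.getD (j + 3) 0) ^^^ wB.getD (j + 5) 0)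
          ^^^ wB.getD (j + 7) 0) ^^^ 0x9E3779B9) ^^^ (4 * i + j)) := by
    rw [byte_xor_spec _ _ _ _ _ _ (hw j).1 (hw (j + 3)).1 (hw (j + 5)).1 (hw (j + 7)).1
      ⟨le_of_eq hG.1, hG.2.1⟩ hG.1 hword.1]
    rw [(hw j).2, (hw (j + 3)).2, (hw (j + 5)).2, (hw (j + 7)).2, hG.2.2, hword.2]
  have hXlt : ((((wB.getD j 0 ^^^ wB.getD (j + 3) 0) ^^^ wB.getD (j + 5) 0)
      ^^^ wB.getD (j + 7) 0) ^^^ 0x9E3779B9) ^^^ (4 * i + j) < 2 ^ 32 := by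
    have hx32 : ∀ a b : Nat, a < 2 ^ 32 → b < 2 ^ 32 → a ^^^ b < 2 ^ 32 :=
      fun a b ha hb => Nat.xor_lt_two_pow ha hb
    exact hx32 _ _ (hx32 _ _ (hx32 _ _ (hx32 _ _ (hx32 _ _ (hv32 j) (hv32 (j + 3)))
      (hv32 (j + 5))) (hv32 (j + 7))) (by norm_num)) (by norm_num; omega)
  have hcs := cyclic_shift_spec _ hXlt
  have hstepA : stepA i wA j = wA.set (j + 8) (fixedD 16 8 (rotl11
      (((((wB.getD j 0 ^^^ wB.getD (j + 3) 0) ^^^ wB.getD (j + 5) 0)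
        ^^^ wB.getD (j + 7) 0) ^^^ 0x9E3779B9) ^^^ (4 * i + j)))) := by
    unfold stepA
    rw [hbx, hcs.1]
  have hstepB : stepB i wB j = wB.set (j + 8) (rotl11
      (((((wB.getD j 0 ^^^ wB.getD (j + 3) 0) ^^^ wB.getD (j + 5) 0)
        ^^^ wB.getD (j + 7) 0) ^^^ 0x9E3779B9) ^^^ (4 * i + j))) := rfl
  have hj8A : j + 8 < wA.length := by omega
  have hj8B : j + 8 < wB.length := by omega
  refine ⟨⟨by rw [hstepA, List.length_set]; exact hlA,
          by rw [hstepB, List.length_set]; exact hlB, ?_⟩, ?_, ?_⟩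
  · intro jj
    by_cases hc : jj = j + 8
    · subst hc
      rw [hstepA, hstepB, getD_set_self _ _ _ _ hj8A, getD_set_self _ _ _ _ hj8B]
      exact ⟨fixedD16_hex8 _, parseB_fixedD16 _ hcs.2⟩
    · rw [hstepA, hstepB, getD_set_ne _ _ _ _ _ (by omega), getD_set_ne _ _ _ _ _ (by omega)]
      exact hw jj
  · rw [hstepA, hstepB, getD_set_self _ _ _ _ hj8A, getD_set_self _ _ _ _ hj8B]
  · rw [hstepB, getD_set_self _ _ _ _ hj8B]
    exact hcs.2

theorem stepA_getD_ne (i : Nat) (w : List (List Char)) (j jj : Nat) (hne : j + 8 ≠ jj) :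
    (stepA i w j).getD jj [] = w.getD jj [] := getD_set_ne _ _ _ _ _ hne

theorem stepB_getD_ne (i : Nat) (w : List Nat) (j jj : Nat) (hne : j + 8 ≠ jj) :
    (stepB i w j).getD jj 0 = w.getD jj 0 := getD_set_ne _ _ _ _ _ hne

theorem drop_take_four (l : List (List Char)) (h : l.length = 12) :
    (l.drop 8).take 4 = [l.getD 8 [], l.getD 9 [], l.getD 10 [], l.getD 11 []] := by
  apply List.ext_getElem
  · simp [h]
  · intro i h1 h2
    simp only [List.getElem_take, List.getElem_drop]
    have hi : i < 4 := by simp [h] at h1; omega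
    interval_cases i <;>
      simp only [List.getElem_cons_zero, List.getElem_cons_succ, Nat.reduceAdd] <;>
      exact (List.getD_eq_getElem _ _ (by omega)).symm

theorem roundA_fst (st : List (List Char) × List (List Char)) (i : Nat) :
    (roundA st i).1 = PySem.List.slice ((List.range 4).foldl (stepA i) st.1)
        (some ((4 : Nat) : Int)) (some ((12 : Nat) : Int)) ++
      PySem.List.slice ((List.range 4).foldl (stepA i) st.1)
        (some ((8 : Nat) : Int)) (some ((12 : Nat) : Int)) := rfl

theorem roundA_snd (st : List (List Char) × List (List Char)) (i : Nat) :
    (roundA st i).2 = st.2 ++ [rjustZ 8 (ip (get_s_table_val ((PySem.Int.mod (11 - (i : Int)) 8).toNat)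
      (PySem.List.slice ((List.range 4).foldl (stepA i) st.1)
        (some ((8 : Nat) : Int)) (some ((12 : Nat) : Int)))))] := rfl

theorem roundB_fst (st : List Nat × List (List Char)) (i : Nat) :
    (roundB st i).1 = List.drop 4 ((List.range 4).foldl (stepB i) st.1) ++
      List.drop 8 ((List.range 4).foldl (stepB i) st.1) := rfl

theorem roundB_snd (st : List Nat × List (List Char)) (i : Nat) :
    (roundB st i).2 = st.2 ++ [rjustZ 8 (pyDigits 16 (permuteIP
      ((List.range 4).foldl (fun x j => (x <<< 32) |||
        sboxWord (S_table.getD ((PySem.Int.mod (11 - (i : Int)) 8).toNat) [])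
          (((List.range 4).foldl (stepB i) st.1).getD (8 + j) 0)) 0)))] := rfl

theorem get_s_table_val_eq (index : Nat) (args : List (List Char)) :
    get_s_table_val index args = (args.map (fun arg =>
      arg.foldl (fun s c => s ++ pyDigits 16 ((S_table.getD index []).getD (hexVal c) 0))
        ([] : List Char))).flatten := rfl

theorem slice_8_12 (l : List (List Char)) :
    PySem.List.slice l (some ((8 : Nat) : Int)) (some ((12 : Nat) : Int)) = (l.drop 8).take 4 := by
  simp [pysem]

theorem slice_4_12 (l : List (List Char)) :
    PySem.List.slice l (some ((4 : Nat) : Int)) (some ((12 : Nat) : Int)) = (l.drop 4).take 8 := by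
  simp [pysem]

theorem round_rel (i : Nat) (hi : i < 33) (wA : List (List Char)) (wB : List Nat)
    (kk : List (List Char)) (h : WRel wA wB) :
    WRel (roundA (wA, kk) i).1 (roundB (wB, kk) i).1 ∧
    (roundA (wA, kk) i).2 = (roundB (wB, kk) i).2 := by
  -- run the four inner steps
  have s0 := step_rel i 0 hi (by omega) wA wB h
  have s1 := step_rel i 1 hi (by omega) _ _ s0.1
  have s2 := step_rel i 2 hi (by omega) _ _ s1.1
  have s3 := step_rel i 3 hi (by omega) _ _ s2.1
  have hfoldA : (List.range 4).foldl (stepA i) wA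
      = stepA i (stepA i (stepA i (stepA i wA 0) 1) 2) 3 := rfl
  have hfoldB : (List.range 4).foldl (stepB i) wB
      = stepB i (stepB i (stepB i (stepB i wB 0) 1) 2) 3 := rfl
  set w4A := stepA i (stepA i (stepA i (stepA i wA 0) 1) 2) 3 with hw4A
  set w4B := stepB i (stepB i (stepB i (stepB i wB 0) 1) 2) 3 with hw4B
  have hrel4 : WRel w4A w4B := s3.1
  obtain ⟨hl4A, hl4B, hw4⟩ := hrel4
  -- canonical shape of the four fresh words
  have canon : ∀ j, j < 4 → w4A.getD (8 + j) [] = fixedD 16 8 (w4B.getD (8 + j) 0) ∧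
      w4B.getD (8 + j) 0 < 2 ^ 32 := by
    intro j hj
    interval_cases j
    · rw [hw4A, hw4B, stepA_getD_ne _ _ _ _ (by omega), stepA_getD_ne _ _ _ _ (by omega),
        stepA_getD_ne _ _ _ _ (by omega), stepB_getD_ne _ _ _ _ (by omega),
        stepB_getD_ne _ _ _ _ (by omega), stepB_getD_ne _ _ _ _ (by omega)]
      exact ⟨s0.2.1, s0.2.2⟩
    · rw [hw4A, hw4B, stepA_getD_ne _ _ _ _ (by omega), stepA_getD_ne _ _ _ _ (by omega),
        stepB_getD_ne _ _ _ _ (by omega), stepB_getD_ne _ _ _ _ (by omega)]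
      exact ⟨s1.2.1, s1.2.2⟩
    · rw [hw4A, hw4B, stepA_getD_ne _ _ _ _ (by omega), stepB_getD_ne _ _ _ _ (by omega)]
      exact ⟨s2.2.1, s2.2.2⟩
    · exact ⟨s3.2.1, s3.2.2⟩
  constructor
  · -- the shifted working arrays stay related
    rw [roundA_fst, roundB_fst, hfoldA, hfoldB, slice_4_12, slice_8_12,
      List.take_of_length_le (by rw [List.length_drop, hl4A]),
      List.take_of_length_le (by rw [List.length_drop, hl4A])]
    refine ⟨by simp [hl4A], by simp [hl4B], ?_⟩
    intro jj
    by_cases hc : jj < 8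
    · rw [getD_append_left _ _ _ _ (by simp [hl4A]; omega),
        getD_append_left _ _ _ _ (by simp [hl4B]; omega),
        getD_drop, getD_drop]
      exact hw4 (4 + jj)
    · rw [getD_append_right _ _ _ _ (by simp [hl4A]; omega),
        getD_append_right _ _ _ _ (by simp [hl4B]; omega)]
      simp only [List.length_drop, hl4A, hl4B]
      rw [getD_drop, getD_drop, show 8 + (jj - 8) = jj from by omega]
      exact hw4 jj
  · -- the appended round keys agree
    rw [roundA_snd, roundB_snd, hfoldA, hfoldB]
    refine congrArg (fun z => kk ++ [z]) ?_
    rw [slice_8_12, drop_take_four _ hl4A]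
    set r := (PySem.Int.mod (11 - (i : Int)) 8).toNat with hr
    have hrlt : r < 8 := ridx_lt i
    have c0 := canon 0 (by omega); have c1 := canon 1 (by omega)
    have c2 := canon 2 (by omega); have c3 := canon 3 (by omega)
    simp only [show (8 : Nat) + 0 = 8 from rfl, show (8 : Nat) + 1 = 9 from rfl,
      show (8 : Nat) + 2 = 10 from rfl, show (8 : Nat) + 3 = 11 from rfl] at c0 c1 c2 c3 ⊢
    rw [c0.1, c1.1, c2.1, c3.1, get_s_table_val_eq]
    simp only [List.map_cons, List.map_nil]
    rw [sbox_arg_eq r _ hrlt, sbox_arg_eq r _ hrlt, sbox_arg_eq r _ hrlt, sbox_arg_eq r _ hrlt]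
    -- value of the concatenated 32-digit string
    set row := S_table.getD r [] with hrow
    set T8 := sboxWord row (w4B.getD 8 0) with hT8
    set T9 := sboxWord row (w4B.getD 9 0) with hT9
    set T10 := sboxWord row (w4B.getD 10 0) with hT10
    set T11 := sboxWord row (w4B.getD 11 0) with hT11
    have hT8lt : T8 < 2 ^ 32 := sboxWord_lt row (row_lt r hrlt) _
    have hT9lt : T9 < 2 ^ 32 := sboxWord_lt row (row_lt r hrlt) _
    have hT10lt : T10 < 2 ^ 32 := sboxWord_lt row (row_lt r hrlt) _
    have hT11lt : T11 < 2 ^ 32 := sboxWord_lt row (row_lt r hrlt) _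
    have hXB : (List.range 4).foldl (fun x j => (x <<< 32) ||| sboxWord row (w4B.getD (8 + j) 0)) 0
        = ((T8 * 2 ^ 32 + T9) * 2 ^ 32 + T10) * 2 ^ 32 + T11 := by
      have e : (List.range 4).foldl (fun x j => (x <<< 32) ||| sboxWord row (w4B.getD (8 + j) 0)) 0
          = ((((0 <<< 32 ||| T8) <<< 32) ||| T9) <<< 32 ||| T10) <<< 32 ||| T11 := rfl
      rw [e, Nat.zero_shiftLeft, Nat.zero_or]
      simp only [Nat.shiftLeft_eq]
      rw [lor_mul_pow_add _ _ 32 hT9lt, lor_mul_pow_add _ _ 32 hT10lt,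
        lor_mul_pow_add _ _ 32 hT11lt]
    have hXlt : ((T8 * 2 ^ 32 + T9) * 2 ^ 32 + T10) * 2 ^ 32 + T11 < 2 ^ 128 := by
      norm_num at hT8lt hT9lt hT10lt hT11lt ⊢
      omega
    have hparse : parseB 16 (((List.range 8).map (fun j => digChar (row.getD (w4B.getD 8 0 / 16 ^ (8 - 1 - j) % 16) 0)) ++
        ((List.range 8).map (fun j => digChar (row.getD (w4B.getD 9 0 / 16 ^ (8 - 1 - j) % 16) 0)) ++
        ((List.range 8).map (fun j => digChar (row.getD (w4B.getD 10 0 / 16 ^ (8 - 1 - j) % 16) 0)) ++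
        ((List.range 8).map (fun j => digChar (row.getD (w4B.getD 11 0 / 16 ^ (8 - 1 - j) % 16) 0)) ++ [])))))
        = ((T8 * 2 ^ 32 + T9) * 2 ^ 32 + T10) * 2 ^ 32 + T11 := by
      rw [parseB_append, parseB_append, parseB_append, parseB_append]
      rw [hT8, hT9, hT10, hT11, hrow]
      rw [← parse_sbox_arg r _ hrlt, ← parse_sbox_arg r _ hrlt,
        ← parse_sbox_arg r _ hrlt, ← parse_sbox_arg r _ hrlt]
      simp only [List.length_append, List.length_map, List.length_range, List.length_nil, parseB]
      norm_num
      ring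
    simp only [List.flatten_cons, List.flatten_nil]
    rw [ip_eq _ _ hparse hXlt, hXB]

theorem foldl_set_length {α : Type} (f : Nat → α) (w0 : List α) (n : Nat) :
    ((List.range n).foldl (fun w i => w.set i (f i)) w0).length = w0.length := by
  induction n with
  | zero => rfl
  | succ n ih =>
    rw [List.range_succ, List.foldl_append]
    simp [ih]

theorem foldl_set_getD {α : Type} (f : Nat → α) (w0 : List α) (n jj : Nat) (d : α)
    (hn : n ≤ w0.length) :
    ((List.range n).foldl (fun w i => w.set i (f i)) w0).getD jj d
      = if jj < n then f jj else w0.getD jj d := by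
  induction n with
  | zero => simp
  | succ n ih =>
    rw [List.range_succ, List.foldl_append]
    simp only [List.foldl_cons, List.foldl_nil]
    by_cases hc : jj = n
    · subst hc
      rw [getD_set_self _ _ _ _ (by rw [foldl_set_length]; omega)]
      simp
    · rw [getD_set_ne _ _ _ _ _ (fun h => hc h.symm), ih (by omega)]
      by_cases h2 : jj < n
      · simp [h2, show jj < n + 1 from by omega]
      · simp [h2, show ¬ jj < n + 1 from by omega]

theorem chunk_hex8 (key : String) (hpre : Pre_get_sub_keys key) (i : Nat) (hi : i < 8) :
    Hex8 ((key.toList.drop (i * 8)).take 8) := by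
  constructor
  · exact (List.length_take_le _ _).trans (by omega)
  · intro c hc
    obtain ⟨j, hj, hcj⟩ := List.mem_iff_getElem.mp hc
    have hj8 : j < 8 := lt_of_lt_of_le hj (List.length_take_le _ _)
    have hbound : i * 8 + j < key.toList.length := by
      simp only [List.length_take, List.length_drop] at hj
      omega
    rw [List.getElem_take, List.getElem_drop] at hcj
    exact hpre (c, i * 8 + j)
      (List.mk_mem_zipIdx_iff_getElem?.mpr (by rw [List.getElem?_eq_getElem hbound, hcj]))
      (by omega)

theorem slice_chunk (ks : List Char) (i : Nat) :
    PySem.List.slice ks (some ((i * 8 : Nat) : Int)) (some (((i + 1) * 8 : Nat) : Int))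
      = (ks.drop (i * 8)).take 8 := by
  rw [PySem.List.slice_natCast, show (i + 1) * 8 - i * 8 = 8 from by omega]

theorem init_rel (key : String) (hpre : Pre_get_sub_keys key) :
    WRel
      ((List.range 8).foldl (fun w i => w.set i
        (PySem.List.slice key.toList (some ((i * 8 : Nat) : Int)) (some (((i + 1) * 8 : Nat) : Int))))
        (List.replicate 12 ([] : List Char)))
      ((List.range 8).foldl (fun w i =>
        let chunk := PySem.List.slice key.toList (some ((i * 8 : Nat) : Int)) (some (((i + 1) * 8 : Nat) : Int))
        w.set i (if chunk = [] then 0 else parseB 16 chunk))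
        (List.replicate 12 (0 : Nat))) := by
  have hA : ∀ jj : Nat,
      ((List.range 8).foldl (fun w i => w.set i
        (PySem.List.slice key.toList (some ((i * 8 : Nat) : Int)) (some (((i + 1) * 8 : Nat) : Int))))
        (List.replicate 12 ([] : List Char))).getD jj []
      = if jj < 8 then (key.toList.drop (jj * 8)).take 8 else [] := by
    intro jj
    rw [foldl_set_getD _ _ 8 jj [] (by simp)]
    split
    · rw [slice_chunk]
    · simp only [List.getD_eq_getElem?_getD, List.getElem?_replicate]
      split <;> rfl
  have hB : ∀ jj : Nat,
      ((List.range 8).foldl (fun w i =>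
        let chunk := PySem.List.slice key.toList (some ((i * 8 : Nat) : Int)) (some (((i + 1) * 8 : Nat) : Int))
        w.set i (if chunk = [] then 0 else parseB 16 chunk))
        (List.replicate 12 (0 : Nat))).getD jj 0
      = if jj < 8 then parseB 16 ((key.toList.drop (jj * 8)).take 8) else 0 := by
    intro jj
    rw [foldl_set_getD (fun i =>
        let chunk := PySem.List.slice key.toList (some ((i * 8 : Nat) : Int)) (some (((i + 1) * 8 : Nat) : Int))
        if chunk = [] then 0 else parseB 16 chunk) _ 8 jj 0 (by simp)]
    split
    · show (let chunk := _; if chunk = [] then 0 else parseB 16 chunk) = _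
      rw [slice_chunk]
      show (if (key.toList.drop (jj * 8)).take 8 = [] then 0 else parseB 16 ((key.toList.drop (jj * 8)).take 8)) = _
      split
      · rename_i hq
        rw [hq]
        rfl
      · rfl
    · simp only [List.getD_eq_getElem?_getD, List.getElem?_replicate]
      split <;> rfl
  refine ⟨by rw [foldl_set_length]; simp, by rw [foldl_set_length]; simp, ?_⟩
  intro jj
  rw [hA jj, hB jj]
  by_cases hjj : jj < 8
  · simp only [if_pos hjj]
    exact ⟨chunk_hex8 key hpre jj hjj, trivial⟩
  · simp only [if_neg hjj]
    exact ⟨⟨by simp, by simp⟩, rfl⟩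

-- ===== VERDICT (by name: the statement is the Claim_ definition above) =====
theorem get_sub_keys_spec : Claim_equal_get_sub_keys := by
  unfold Claim_equal_get_sub_keys
  intro key _ hpre
  unfold Spec_get_sub_keys get_sub_keys get_sub_keys_alt
  refine congrArg (List.map String.ofList) ?_
  have hrel := foldl_rel
    (fun (stA : List (List Char) × List (List Char)) (stB : List Nat × List (List Char)) =>
      WRel stA.1 stB.1 ∧ stA.2 = stB.2)
    roundA roundB (List.range 33)
    (((List.range 8).foldl (fun w i => w.set i
        (PySem.List.slice key.toList (some ((i * 8 : Nat) : Int)) (some (((i + 1) * 8 : Nat) : Int))))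
        (List.replicate 12 ([] : List Char))), [])
    (((List.range 8).foldl (fun w i =>
        let chunk := PySem.List.slice key.toList (some ((i * 8 : Nat) : Int)) (some (((i + 1) * 8 : Nat) : Int))
        w.set i (if chunk = [] then 0 else parseB 16 chunk))
        (List.replicate 12 (0 : Nat))), [])
    ⟨init_rel key hpre, rfl⟩
    (by
      rintro ⟨wa, ka⟩ ⟨wb, kb⟩ c hc ⟨h1, h2⟩
      dsimp at h1 h2 ⊢
      subst h2
      exact round_rel c (List.mem_range.mp hc) wa wb ka h1)
  exact hrel.2
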